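-- pv_equiv track=rewrite | github.com/Mjlozano/DiscretasBot | combi1.py | lastP
-- ===== SOURCE A (Python) =====
-- from itertools import combinations
--
-- def lastP(str, p, k):
--     perm = sorted(''.join(chars) for chars in combinations(str, k))
--     if len(perm)>=p:
--         fResult = f'Ultimas {p} palabras\n'
--         for x in perm[len(perm)-p:]:
--             fResult = fResult+"\n"+x
--     else:
--         fResult='La cantidad de palabras que se pueden generar es menor a las requeridas con el parámetro p'
--     return fResult
-- ===== SOURCE B (Python) =====
-- from itertools import combinations
--
-- def lastP(str, p, k):
--     # Closed-form binomial count decides the "too few words" case up front;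
--     # otherwise a single streaming pass keeps only the p largest combination
--     # strings (threshold skip + periodic batch reduction of a bounded buffer).
--     if _binom(len(str), k) < p:
--         return 'La cantidad de palabras que se pueden generar es menor a las requeridas con el parámetro p'
--     buf = []
--     thr = None
--     if p > 0:
--         for chars in combinations(str, k):
--             w = ''.join(chars)
--             if thr is not None and w <= thr:
--                 continue
--             buf.append(w)
--             if len(buf) >= 2 * p:
--                 buf = sorted(buf)[-p:]
--                 thr = buf[0]
--     out = f'Ultimas {p} palabras\n'
--     for w in sorted(buf)[-p:]:
--         out = out + '\n' + w
--     return out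
--
-- def _binom(n, k):
--     # C(n, k) by Pascal's rule (no imports needed)
--     row = [1]
--     for _ in range(n):
--         row = [1] + [row[j] + row[j + 1] for j in range(len(row) - 1)] + [1]
--     return row[k] if 0 <= k < len(row) else 0
-- ===== Notes on version B (the rewrite author's own statement) =====
-- stated objective: alternative
-- what changed: A materialises and sorts all C(n,k) combination strings and slices the last p; B first decides the too-few-words case by a Pascal's-rule binomial count and otherwise streams over the combinations keeping only the p largest seen so far (running-threshold skip plus periodic batch reduction of a bounded candidate buffer).
import Mathlib
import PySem

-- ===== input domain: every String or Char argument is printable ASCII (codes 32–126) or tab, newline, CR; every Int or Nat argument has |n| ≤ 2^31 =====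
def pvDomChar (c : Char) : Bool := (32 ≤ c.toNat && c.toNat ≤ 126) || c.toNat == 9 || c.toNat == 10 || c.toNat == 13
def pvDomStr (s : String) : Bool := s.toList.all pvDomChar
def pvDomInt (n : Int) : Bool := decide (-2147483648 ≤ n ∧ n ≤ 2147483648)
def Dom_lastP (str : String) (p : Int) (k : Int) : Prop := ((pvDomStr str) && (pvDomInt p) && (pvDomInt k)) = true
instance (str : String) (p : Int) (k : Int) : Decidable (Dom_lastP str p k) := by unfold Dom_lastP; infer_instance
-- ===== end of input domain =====

-- B replaces "sort all C(n,k) combination strings and slice" by a streaming top-p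
-- selection (threshold skip + periodic batch reduction); equivalence of the returned
-- string is proved on Pre_ (0 ≤ k; A raises ValueError for negative k).

-- Both Pythons share these literals.
def pvMsg : String := "La cantidad de palabras que se pueden generar es menor a las requeridas con el parámetro p"
-- f'Ultimas {p} palabras\n' as a char list
def pvHeader (p : Int) : List Char :=
  "Ultimas ".toList ++ (PySem.Int.toStr p).toList ++ " palabras\n".toList

-- ===== PORT A =====
-- combinations(str, k) yields tuples of 1-char strings; ''.join of such a tuple is
-- exactly the underlying char list, so each joined word is modelled as List Char.
def lastP (str : String) (p : Int) (k : Int) : String :=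
  -- sorted(...) is ported as the stable List.mergeSort (equal to PySem.List.sorted: see mergeSort_eq_sorted)
  let perm := (PySem.List.combinations str.toList k.toNat).mergeSort (fun a b => decide (a ≤ b))
  if p ≤ (perm.length : Int) then
    String.ofList (List.foldl (fun acc x => acc ++ '\n' :: x) (pvHeader p)
      (PySem.List.slice perm (some ((perm.length : Int) - p)) none))
  else pvMsg

-- ===== PORT B =====
-- _binom(n, k): Pascal's-rule binomial coefficient, row by row
def pvBinom (n : Nat) (k : Int) : Int :=
  let row := (PySem.List.pyRange 0 (n : Int) 1).foldl (fun row _ =>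
    [1] ++ (PySem.List.pyRange 0 ((row.length : Int) - 1) 1).map
      (fun j => PySem.List.pyGetD row j 0 + PySem.List.pyGetD row (j + 1) 0) ++ [1]) [(1 : Int)]
  if 0 ≤ k ∧ k < (row.length : Int) then PySem.List.pyGetD row k 0 else 0

-- loop body of Source B: state = (buf, thr); sorted(...) is ported as the stable List.mergeSort
def bStep (p : Int) (st : List (List Char) × Option (List Char)) (w : List Char) :
    List (List Char) × Option (List Char) :=
  if (match st.2 with | some t => decide (w ≤ t) | none => false) then st
  else
    let buf := st.1 ++ [w]
    if 2 * p ≤ (buf.length : Int) then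
      -- buf = sorted(buf)[-p:]; thr = buf[0]  (buf is nonempty here: its length is ≥ 2p ≥ 2)
      let buf2 := PySem.List.slice (buf.mergeSort (fun a b => decide (a ≤ b))) (some (-p)) none
      (buf2, some (buf2.headD []))
    else (buf, st.2)

def lastP_alt (str : String) (p : Int) (k : Int) : String :=
  if pvBinom str.toList.length k < p then pvMsg
  else
    let st := if 0 < p then
        (PySem.List.combinations str.toList k.toNat).foldl (bStep p) ([], none)
      else (([] : List (List Char)), (none : Option (List Char)))
    String.ofList (List.foldl (fun acc x => acc ++ '\n' :: x) (pvHeader p)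
      (PySem.List.slice (st.1.mergeSort (fun a b => decide (a ≤ b))) (some (-p)) none))

-- ===== PRECONDITION & SPEC =====
-- A raises ValueError (combinations with negative r) iff k < 0; that is all Pre_ excludes.
def Pre_lastP (str : String) (p : Int) (k : Int) : Prop := 0 ≤ k
instance (str : String) (p : Int) (k : Int) : Decidable (Pre_lastP str p k) := by
  unfold Pre_lastP; infer_instance
def pvWitness_lastP : String × Int × Int := ("ba", 2, 1)

def Spec_lastP (str : String) (p : Int) (k : Int) (out : String) : Prop := out = lastP_alt str p k
instance (str : String) (p : Int) (k : Int) (out : String) : Decidable (Spec_lastP str p k out) := by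
  unfold Spec_lastP; infer_instance

-- ===== CLAIM (what is proved, stated in full; the proofs are below) =====
def Claim_equal_lastP : Prop := ∀ (str : String) (p : Int) (k : Int), Dom_lastP str p k → Pre_lastP str p k → Spec_lastP str p k (lastP str p k)

-- ===== LEMMAS AND PROOFS =====

-- the p largest elements of ws, in ascending order (= sorted(ws)[len(ws)-P:])
def topP (P : Nat) (ws : List (List Char)) : List (List Char) :=
  (PySem.List.sorted ws (fun x => x) false).drop (ws.length - P)

-- insertion step used by PySem.List.sorted, specialised to our element type
def pvIns (w : List Char) (s : List (List Char)) : List (List Char) :=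
  PySem.List.insertBy (fun a b => decide (a < b)) w s

-- what appending one element does to the p largest, stated on the sorted list
def stepM (P : Nat) (best : List (List Char)) (w : List Char) : List (List Char) :=
  if best.length < P then pvIns w best
  else match best with
  | [] => []
  | b0 :: t => if b0 < w then pvIns w t else best

-- the bare instances the ports elaborate with agree with the LinearOrder ones
lemma sorted_inst_eq (xs : List (List Char)) (key : List Char → List Char) :
    PySem.List.sorted xs key false
      = @PySem.List.sorted (List Char) (List Char) List.instLinearOrder.toLT
          LinearOrder.toDecidableLT xs key false := by
  congr 1

lemma sorted_pairwise_le (ws : List (List Char)) :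
    (PySem.List.sorted ws (fun x => x) false).Pairwise (· ≤ ·) := by
  rw [sorted_inst_eq]
  simpa using PySem.List.sorted_pairwise ws (fun x => x)

-- Python's sorted is stable, so it agrees with mergeSort (the ports' sort)
lemma mergeSort_eq_sorted (xs : List (List Char)) :
    xs.mergeSort (fun a b => decide (a ≤ b)) = PySem.List.sorted xs (fun x => x) false := by
  rw [sorted_inst_eq]
  refine (PySem.List.sorted_id_eq_of_perm_of_pairwise xs _ (List.mergeSort_perm xs _) ?_).symm
  have := List.pairwise_mergeSort (le := fun (a b : List Char) => decide (a ≤ b))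
    (fun a b c hab hbc => by simp at hab hbc ⊢; exact le_trans hab hbc)
    (fun a b => by simp; exact le_total a b) xs
  simpa using this

lemma sorted_append_singleton (ws : List (List Char)) (w : List Char) :
    PySem.List.sorted (ws ++ [w]) (fun x => x) false
      = pvIns w (PySem.List.sorted ws (fun x => x) false) := by
  rw [PySem.List.sorted_eq_foldl_insertBy, PySem.List.sorted_eq_foldl_insertBy, List.foldl_append]
  rfl

lemma pvIns_cons (w y : List Char) (ys : List (List Char)) :
    pvIns w (y :: ys) = if w < y then w :: y :: ys else y :: pvIns w ys := by
  simp only [pvIns, PySem.List.insertBy]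
  split_ifs with h <;> simp_all

lemma pvIns_of_le (y : List Char) (ys : List (List Char)) (h : ∀ z ∈ ys, y ≤ z) :
    pvIns y ys = y :: ys := by
  induction ys with
  | nil => rfl
  | cons z zs ih =>
    rw [pvIns_cons]
    by_cases hz : y < z
    · simp [hz]
    · have : z = y := le_antisymm (not_lt.mp hz) (h z (by simp))
      subst this
      rw [if_neg hz, ih (fun u hu => h u (by simp [hu]))]

lemma stepM_small (P : Nat) (best : List (List Char)) (w : List Char) (h : best.length < P) :
    stepM P best w = pvIns w best := if_pos h

lemma stepM_full (P : Nat) (b0 : List Char) (t : List (List Char)) (w : List Char)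
    (h : ¬ (b0 :: t).length < P) :
    stepM P (b0 :: t) w = if b0 < w then pvIns w t else b0 :: t := by
  simp only [stepM, if_neg h]

lemma key_drop_ins (P : Nat) (hP : 1 ≤ P) :
    ∀ (s : List (List Char)), s.Pairwise (· ≤ ·) → ∀ w,
      (pvIns w s).drop (s.length + 1 - P) = stepM P (s.drop (s.length - P)) w := by
  intro s
  induction s with
  | nil =>
    intro _ w
    rw [show pvIns w [] = [w] from rfl]
    simp only [List.length_nil, Nat.zero_sub, List.drop_zero, Nat.zero_add]
    rw [Nat.sub_eq_zero_of_le hP, List.drop_zero, stepM_small P [] w (by simpa using hP)]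
    rfl
  | cons y ys ih =>
    intro hpw w
    rw [List.pairwise_cons] at hpw
    obtain ⟨hy, hys⟩ := hpw
    rw [pvIns_cons]
    simp only [List.length_cons]
    by_cases hlt : w < y
    · rw [if_pos hlt]
      by_cases hnP : ys.length + 1 < P
      · rw [show ys.length + 1 - P = 0 by omega, show ys.length + 1 + 1 - P = 0 by omega,
          List.drop_zero, List.drop_zero, stepM_small P _ w (by simpa using hnP),
          pvIns_cons, if_pos hlt]
      · have hPn : P ≤ ys.length + 1 := by omega
        have hlen : ((y :: ys).drop (ys.length + 1 - P)).length = P := by simp; omega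
        rcases hb : (y :: ys).drop (ys.length + 1 - P) with _ | ⟨b0, t⟩
        · rw [hb] at hlen; simp at hlen; omega
        · rw [hb] at hlen
          have hb0 : b0 ∈ (y :: ys) := List.drop_subset _ _ (by rw [hb]; simp)
          have hyb0 : y ≤ b0 := by
            rcases List.mem_cons.mp hb0 with h | h
            · exact le_of_eq h.symm
            · exact hy b0 h
          have hnb : ¬ b0 < w := not_lt.mpr (le_of_lt (lt_of_lt_of_le hlt hyb0))
          rw [stepM_full P b0 t w (by rw [hlen]; omega), if_neg hnb,
            show ys.length + 1 + 1 - P = (ys.length + 1 - P) + 1 by omega,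
            List.drop_succ_cons, hb]
    · rw [if_neg hlt]
      by_cases hnP : ys.length + 1 < P
      · rw [show ys.length + 1 - P = 0 by omega, show ys.length + 1 + 1 - P = 0 by omega,
          List.drop_zero, List.drop_zero, stepM_small P _ w (by simpa using hnP),
          pvIns_cons, if_neg hlt]
      · have hPn : P ≤ ys.length + 1 := by omega
        rw [show ys.length + 1 + 1 - P = (ys.length + 1 - P) + 1 by omega, List.drop_succ_cons,
          ih hys w]
        by_cases hPe : P = ys.length + 1
        · rw [show ys.length + 1 - P = 0 by omega, show ys.length - P = 0 by omega,
            List.drop_zero, List.drop_zero,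
            stepM_small P ys w (by omega),
            stepM_full P y ys w (by simp; omega)]
          by_cases hyw' : y < w
          · rw [if_pos hyw']
          · have : w = y := le_antisymm (not_lt.mp hyw') (not_lt.mp hlt)
            subst this
            rw [if_neg hyw', pvIns_of_le w ys hy]
        · rw [show ys.length + 1 - P = (ys.length - P) + 1 by omega, List.drop_succ_cons]

lemma topP_pairwise (P : Nat) (ws : List (List Char)) :
    (topP P ws).Pairwise (· ≤ ·) := (sorted_pairwise_le ws).drop

lemma topP_length (P : Nat) (ws : List (List Char)) :
    (topP P ws).length = ws.length - (ws.length - P) := by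
  simp [topP, PySem.List.length_sorted]

lemma topP_master (P : Nat) (hP : 1 ≤ P) (ws : List (List Char)) (w : List Char) :
    topP P (ws ++ [w]) = stepM P (topP P ws) w := by
  unfold topP
  rw [sorted_append_singleton]
  have hl : (PySem.List.sorted ws (fun x => x) false).length = ws.length :=
    PySem.List.length_sorted ws _ _
  rw [show (ws ++ [w]).length = ws.length + 1 by simp, ← hl]
  exact key_drop_ins P hP _ (sorted_pairwise_le ws) w

lemma topP_append_congr (P : Nat) (hP : 1 ≤ P) (xs ys : List (List Char)) (w : List Char)
    (h : topP P xs = topP P ys) : topP P (xs ++ [w]) = topP P (ys ++ [w]) := by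
  rw [topP_master P hP, topP_master P hP, h]

lemma topP_skip (P : Nat) (hP : 1 ≤ P) (ws : List (List Char)) (w : List Char)
    (hlen : P ≤ ws.length) (hw : w ≤ (topP P ws).headD []) :
    topP P (ws ++ [w]) = topP P ws := by
  have hl : (topP P ws).length = P := by rw [topP_length]; omega
  rcases hb : topP P ws with _ | ⟨b0, t⟩
  · rw [hb] at hl; simp at hl; omega
  · rw [hb] at hw hl
    simp only [List.headD_cons] at hw
    rw [topP_master P hP, hb, stepM_full P b0 t w (by omega), if_neg (not_lt.mpr hw)]

lemma topP_head_mono (P : Nat) (hP : 1 ≤ P) (ws : List (List Char)) (w : List Char)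
    (hlen : P ≤ ws.length) :
    (topP P ws).headD [] ≤ (topP P (ws ++ [w])).headD [] := by
  have hl : (topP P ws).length = P := by rw [topP_length]; omega
  rcases hb : topP P ws with _ | ⟨b0, t⟩
  · rw [hb] at hl; simp at hl; omega
  · rw [topP_master P hP, hb, stepM_full P b0 t w (by rw [hb] at hl; omega)]
    by_cases hbw : b0 < w
    · rw [if_pos hbw]
      rcases t with _ | ⟨t0, t'⟩
      · rw [show pvIns w [] = [w] from rfl]
        simpa using le_of_lt hbw
      · rw [pvIns_cons]
        have hpw := topP_pairwise P ws
        rw [hb, List.pairwise_cons] at hpw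
        have hb0t0 : b0 ≤ t0 := hpw.1 t0 (by simp)
        by_cases hwt : w < t0
        · rw [if_pos hwt]; simpa using le_of_lt hbw
        · rw [if_neg hwt]; simpa using hb0t0
    · rw [if_neg hbw]

lemma topP_topP (P : Nat) (ws : List (List Char)) :
    topP P (topP P ws) = topP P ws := by
  have hs : PySem.List.sorted (topP P ws) (fun x => x) false = topP P ws := by
    rw [sorted_inst_eq]
    exact PySem.List.sorted_eq_self_of_pairwise _ _ (by simpa using topP_pairwise P ws)
  rw [topP, hs, topP_length, show ws.length - (ws.length - P) - P = 0 by omega, List.drop_zero]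

-- sorted(buf)[-p:] is topP, for 0 < p
lemma slice_neg_eq_topP (p : Int) (hp : 0 < p) (buf : List (List Char)) :
    PySem.List.slice (PySem.List.sorted buf (fun x => x) false) (some (-p)) none
      = topP p.toNat buf := by
  rw [show -p = -((p.toNat : Nat) : Int) by omega,
    PySem.List.slice_from_neg_natCast _ p.toNat (by omega), topP, PySem.List.length_sorted]

-- the loop invariant of Source B
def BInv (p : Int) (ws : List (List Char)) (st : List (List Char) × Option (List Char)) : Prop :=
  topP p.toNat st.1 = topP p.toNat ws ∧ st.1.length ≤ ws.length ∧
  (∀ t, st.2 = some t → p.toNat ≤ ws.length ∧ t ≤ (topP p.toNat ws).headD [])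

lemma bStep_inv (p : Int) (hp : 0 < p) (ws : List (List Char)) (w : List Char)
    (st : List (List Char) × Option (List Char)) (h : BInv p ws st) :
    BInv p (ws ++ [w]) (bStep p st w) := by
  obtain ⟨h2, h3, h4⟩ := h
  have hP1 : 1 ≤ p.toNat := by omega
  rw [bStep]
  rcases hthr : st.2 with _ | t
  · -- thr is None: no skip
    simp only [Bool.false_eq_true, if_false]
    by_cases hc : 2 * p ≤ ((st.1 ++ [w]).length : Int)
    · rw [if_pos hc]
      have hb2 : PySem.List.slice ((st.1 ++ [w]).mergeSort (fun a b => decide (a ≤ b)))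
          (some (-p)) none = topP p.toNat (st.1 ++ [w]) := by
        rw [mergeSort_eq_sorted]
        exact slice_neg_eq_topP p hp _
      have hcong := topP_append_congr p.toNat hP1 st.1 ws w h2
      refine ⟨?_, ?_, ?_⟩
      · simp only [hb2, topP_topP, hcong]
      · simp only [hb2]
        rw [topP_length]
        simp at h3 ⊢
        omega
      · intro t' ht'
        simp only [Option.some.injEq] at ht'
        constructor
        · have hl1 : (st.1 ++ [w]).length = st.1.length + 1 := by simp
          rw [hl1] at hc
          push_cast at hc
          have hl2 : (ws ++ [w]).length = ws.length + 1 := by simp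
          rw [hl2]
          omega
        · rw [← ht', hb2, hcong]
    · rw [if_neg hc]
      refine ⟨topP_append_congr p.toNat hP1 st.1 ws w h2, by simp; omega, ?_⟩
      intro t' ht'
      cases ht'
  · -- thr = some t
    obtain ⟨hPl, hth⟩ := h4 t hthr
    by_cases hwt : w ≤ t
    · rw [if_pos (by simp [hwt])]
      have hskip := topP_skip p.toNat hP1 ws w hPl (le_trans hwt hth)
      refine ⟨by rw [h2, hskip], by simp; omega, ?_⟩
      intro t' ht'
      rw [hthr] at ht'
      cases ht'
      refine ⟨by simp; omega, ?_⟩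
      rw [hskip]
      exact hth
    · rw [if_neg (by simp [hwt])]
      by_cases hc : 2 * p ≤ ((st.1 ++ [w]).length : Int)
      · rw [if_pos hc]
        have hb2 : PySem.List.slice ((st.1 ++ [w]).mergeSort (fun a b => decide (a ≤ b)))
            (some (-p)) none = topP p.toNat (st.1 ++ [w]) := by
          rw [mergeSort_eq_sorted]
          exact slice_neg_eq_topP p hp _
        have hcong := topP_append_congr p.toNat hP1 st.1 ws w h2
        refine ⟨?_, ?_, ?_⟩
        · simp only [hb2, topP_topP, hcong]
        · simp only [hb2]
          rw [topP_length]
          simp at h3 ⊢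
          omega
        · intro t' ht'
          simp only [Option.some.injEq] at ht'
          constructor
          · have hl1 : (st.1 ++ [w]).length = st.1.length + 1 := by simp
            rw [hl1] at hc
            push_cast at hc
            have hl2 : (ws ++ [w]).length = ws.length + 1 := by simp
            rw [hl2]
            omega
          · rw [← ht', hb2, hcong]
      · rw [if_neg hc]
        refine ⟨topP_append_congr p.toNat hP1 st.1 ws w h2, by simp; omega, ?_⟩
        intro t' ht'
        cases ht'
        refine ⟨by simp; omega, ?_⟩
        exact le_trans hth (topP_head_mono p.toNat hP1 ws w hPl)

lemma foldl_bStep_inv (p : Int) (hp : 0 < p) :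
    ∀ (C ws : List (List Char)) (st : List (List Char) × Option (List Char)),
      BInv p ws st → BInv p (ws ++ C) (C.foldl (bStep p) st) := by
  intro C
  induction C with
  | nil => intro ws st h; simpa using h
  | cons w C ih =>
    intro ws st h
    rw [show ws ++ (w :: C) = (ws ++ [w]) ++ C by simp, List.foldl_cons]
    exact ih (ws ++ [w]) _ (bStep_inv p hp ws w st h)

-- Pascal's rule: the Python row loop computes the binomial coefficients
def pascalRow (m : Nat) : List Int := (List.range (m + 1)).map (fun j => (Nat.choose m j : Int))

lemma rowStep_pascal (m : Nat) :
    [(1 : Int)] ++ (PySem.List.pyRange 0 (((pascalRow m).length : Int) - 1) 1).map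
        (fun j => PySem.List.pyGetD (pascalRow m) j 0 + PySem.List.pyGetD (pascalRow m) (j + 1) 0)
      ++ [1] = pascalRow (m + 1) := by
  have hlen : (pascalRow m).length = m + 1 := by simp [pascalRow]
  have hcast : ((pascalRow m).length : Int) - 1 = ((m : Nat) : Int) := by rw [hlen]; push_cast; ring
  rw [hcast, PySem.List.pyRange_zero_nat, List.map_map]
  have hmap : ∀ j ∈ List.range m,
      ((fun j => PySem.List.pyGetD (pascalRow m) j 0 + PySem.List.pyGetD (pascalRow m) (j + 1) 0) ∘
        (fun k : Nat => (k : Int))) j = (fun j => (Nat.choose (m + 1) (j + 1) : Int)) j := by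
    intro j hj
    rw [List.mem_range] at hj
    simp only [Function.comp]
    rw [show ((j : Int) + 1) = ((j + 1 : Nat) : Int) by push_cast; ring,
      PySem.List.pyGetD_natCast, PySem.List.pyGetD_natCast, pascalRow,
      PySem.List.getD_map_range _ _ _ _ (by omega), PySem.List.getD_map_range _ _ _ _ (by omega),
      Nat.choose_succ_succ]
    push_cast
    ring
  rw [List.map_congr_left hmap, pascalRow, List.range_succ_eq_map, List.map_cons, List.map_map,
    List.range_succ, List.map_append]
  simp [Function.comp, Nat.choose_self]

lemma foldl_pascal : ∀ (l : List Int) (m : Nat),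
    l.foldl (fun row _ =>
      [(1 : Int)] ++ (PySem.List.pyRange 0 ((row.length : Int) - 1) 1).map
        (fun j => PySem.List.pyGetD row j 0 + PySem.List.pyGetD row (j + 1) 0) ++ [1])
      (pascalRow m) = pascalRow (m + l.length) := by
  intro l
  induction l with
  | nil => intro m; simp
  | cons a l ih =>
    intro m
    rw [List.foldl_cons, rowStep_pascal, ih]
    congr 1
    simp
    omega

lemma binom_eq_choose (n : Nat) (k : Int) (hk : 0 ≤ k) :
    pvBinom n k = (Nat.choose n k.toNat : Int) := by
  have hrow : (PySem.List.pyRange 0 (n : Int) 1).foldl (fun row _ =>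
      [(1 : Int)] ++ (PySem.List.pyRange 0 ((row.length : Int) - 1) 1).map
        (fun j => PySem.List.pyGetD row j 0 + PySem.List.pyGetD row (j + 1) 0) ++ [1])
      [(1 : Int)] = pascalRow n := by
    have h1 := foldl_pascal (PySem.List.pyRange 0 (n : Int) 1) 0
    rw [show pascalRow 0 = [(1 : Int)] by simp [pascalRow]] at h1
    rw [h1, PySem.List.length_pyRange_one]
    congr 1
    omega
  rw [pvBinom]
  simp only [hrow]
  have hlen : (pascalRow n).length = n + 1 := by simp [pascalRow]
  by_cases hk2 : k < ((pascalRow n).length : Int)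
  · rw [if_pos ⟨hk, hk2⟩, show k = ((k.toNat : Nat) : Int) by omega, PySem.List.pyGetD_natCast,
      pascalRow, PySem.List.getD_map_range _ _ _ _ (by rw [hlen] at hk2; omega)]
    congr 1
  · rw [if_neg (by tauto)]
    rw [hlen] at hk2
    rw [Nat.choose_eq_zero_of_lt (by omega)]
    simp

lemma length_combinations (xs : List Char) :
    ∀ r, (PySem.List.combinations xs r).length = Nat.choose xs.length r := by
  induction xs with
  | nil =>
    intro r
    cases r with
    | zero => simp [PySem.List.combinations_zero]
    | succ r => simp [PySem.List.combinations_nil_succ]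
  | cons x xs ih =>
    intro r
    cases r with
    | zero => simp [PySem.List.combinations_zero]
    | succ r =>
      rw [PySem.List.combinations_cons_succ, List.length_append, List.length_map, ih, ih,
        List.length_cons, Nat.choose_succ_succ]

-- ===== VERDICT (by name: the statement is the Claim_ definition above) =====
theorem lastP_spec : Claim_equal_lastP := by
  intro str p k _ hk
  unfold Spec_lastP lastP lastP_alt
  simp only [mergeSort_eq_sorted]
  set C := PySem.List.combinations str.toList k.toNat with hC
  have hlenperm : (PySem.List.sorted C (fun x => x) false).length = C.length :=
    PySem.List.length_sorted C _ _
  have hbin : pvBinom str.toList.length k = (C.length : Int) := by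
    rw [binom_eq_choose _ _ hk, hC, length_combinations]
  by_cases hcond : p ≤ ((PySem.List.sorted C (fun x => x) false).length : Int)
  · rw [if_pos hcond, if_neg (by rw [hbin]; rw [hlenperm] at hcond; omega)]
    by_cases hp : 0 < p
    · rw [if_pos hp]
      have hinv := foldl_bStep_inv p hp C [] ([], none)
        ⟨rfl, by simp, by intro t h; cases h⟩
      rw [List.nil_append] at hinv
      obtain ⟨h2, _, _⟩ := hinv
      congr 1
      congr 1
      rw [slice_neg_eq_topP p hp _, h2,
        PySem.List.slice_from _ (by rw [hlenperm]; omega), topP]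
      congr 1
      rw [hlenperm]
      omega
    · rw [if_neg hp]
      congr 1
      congr 1
      rw [PySem.List.slice_some_none]
      have hcl : PySem.List.clampIdx (PySem.List.sorted C (fun x => x) false).length
          (((PySem.List.sorted C (fun x => x) false).length : Int) - p)
          = (PySem.List.sorted C (fun x => x) false).length := by
        rw [PySem.List.clampIdx, if_neg (by omega)]
        omega
      rw [hcl, List.drop_length,
        show PySem.List.sorted (([], (none : Option (List Char))).1) (fun x => x) false = []
          from rfl,
        PySem.List.slice_some_none]
      simp
  · rw [if_neg hcond, if_pos (by rw [hbin]; rw [hlenperm] at hcond; omega)]
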